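-- pv_equiv track=rewrite | github.com/barbelloper/Learning-Python | main.py | solution
-- ===== SOURCE A (Python) =====
-- def solution(s):
--   a=sorted(s)
--   for x in range(len(a)-1):
--     for y in range(x+1,len(a)):
--       if a[x]<a[y]:
--         temp = a[x]
--         a[x] = a[y]
--         a[y] = temp
--
--   answer = ''
--   for x in range(len(a)):
--     answer +=a[x]
--   return answer
-- ===== SOURCE B (Python) =====
-- def solution(s):
--     counts = {}
--     for ch in s:
--         counts[ch] = counts.get(ch, 0) + 1
--     return ''.join(ch * counts[ch] for ch in sorted(counts, reverse=True))
-- ===== Notes on version B (the rewrite author's own statement) =====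
-- stated objective: faster
-- what changed: Replaces A's quadratic selection-sort-by-swaps over all characters with a one-pass frequency table whose distinct keys are sorted descending and expanded by repetition count.
import Mathlib
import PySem

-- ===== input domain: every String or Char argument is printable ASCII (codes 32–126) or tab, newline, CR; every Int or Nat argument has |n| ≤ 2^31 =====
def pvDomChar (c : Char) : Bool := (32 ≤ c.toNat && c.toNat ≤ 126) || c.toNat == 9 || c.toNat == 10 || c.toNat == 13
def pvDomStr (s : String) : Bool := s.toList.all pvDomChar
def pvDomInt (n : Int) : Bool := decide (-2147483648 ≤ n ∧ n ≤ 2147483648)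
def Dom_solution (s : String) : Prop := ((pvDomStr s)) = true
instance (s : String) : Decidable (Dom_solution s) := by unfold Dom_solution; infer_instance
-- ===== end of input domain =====

-- B sorts descending via a one-pass frequency table expanded by counts, instead of A's quadratic swap loop.

-- ===== PORT A =====
-- 'if a[x] < a[y]: temp = a[x]; a[x] = a[y]; a[y] = temp' — pyGet? is none only out of range (never reached: x, y ∈ range(len))
def swapStepA (x y : Int) (a : List Char) : List Char :=
  match PySem.List.pyGet? a x, PySem.List.pyGet? a y with
  | some ax, some ay => if ax < ay then PySem.List.pySetD (PySem.List.pySetD a x ay) y ax else a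
  | _, _ => a

def solution (s : String) : String :=
  let a := PySem.List.sorted s.toList (fun c => c) false
  let a := (PySem.List.pyRange 0 (PySem.List.len a - 1) 1).foldl
      (fun a x => (PySem.List.pyRange (x + 1) (PySem.List.len a) 1).foldl
        (fun a y => swapStepA x y a) a) a
  let answer := (PySem.List.pyRange 0 (PySem.List.len a) 1).foldl
      (fun ans x => ans ++ [PySem.List.pyGetD a x ' ']) []
  String.ofList answer

-- ===== PORT B =====
def solution_alt (s : String) : String :=
  let counts := s.toList.foldl (fun d ch => d.insert ch (d.getD ch 0 + 1)) (PySem.Dict.empty : PySem.Dict Char Int)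
  let ks := PySem.List.sorted counts.keys (fun c => c) true
  String.ofList (ks.flatMap (fun ch => PySem.List.pyRepeat [ch] (counts.getD ch 0)))

-- ===== PRECONDITION & SPEC =====
def Spec_solution (s : String) (out : String) : Prop := out = solution_alt s
instance (s : String) (out : String) : Decidable (Spec_solution s out) := by unfold Spec_solution; infer_instance

-- ===== CLAIM (what is proved, stated in full; the proofs are below) =====
def Claim_equal_solution : Prop := ∀ (s : String), Dom_solution s → Spec_solution s (solution s)

-- ===== LEMMAS AND PROOFS =====

-- Proof-side model of A's inner loop: champion-carrying selection of the maximum.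
def selMax (c : Char) : List Char → Char × List Char
  | [] => (c, [])
  | h :: t => if c < h then ((selMax h t).1, c :: (selMax h t).2)
              else ((selMax c t).1, h :: (selMax c t).2)

lemma selMax_perm (c : Char) (t : List Char) :
    ((selMax c t).1 :: (selMax c t).2).Perm (c :: t) := by
  induction t generalizing c with
  | nil => simp [selMax]
  | cons h t ih =>
    simp only [selMax]
    split_ifs
    · dsimp only
      exact (List.Perm.swap _ _ _).trans ((ih h).cons c)
    · dsimp only
      exact ((List.Perm.swap _ _ _).trans ((ih c).cons h)).trans (List.Perm.swap _ _ _)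

lemma selMax_le (c : Char) (t : List Char) :
    c ≤ (selMax c t).1 ∧ ∀ v ∈ (selMax c t).2, v ≤ (selMax c t).1 := by
  induction t generalizing c with
  | nil => simp [selMax]
  | cons h t ih =>
    simp only [selMax]
    split_ifs with hch
    · dsimp only
      refine ⟨le_of_lt (lt_of_lt_of_le hch (ih h).1), ?_⟩
      intro v hv
      rcases List.mem_cons.mp hv with hv | hv
      · subst hv; exact le_of_lt (lt_of_lt_of_le hch (ih h).1)
      · exact (ih h).2 v hv
    · dsimp only
      refine ⟨(ih c).1, ?_⟩
      intro v hv
      rcases List.mem_cons.mp hv with hv | hv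
      · subst hv; exact le_trans (le_of_not_gt hch) (ih c).1
      · exact (ih c).2 v hv

lemma set_append_cons (p r : List Char) (c v : Char) :
    (p ++ c :: r).set p.length v = p ++ v :: r := by
  induction p with
  | nil => simp
  | cons a p ih => simp [ih]

lemma getElem?_append_cons (p r : List Char) (c : Char) :
    (p ++ c :: r)[p.length]? = some c := by
  simp

lemma swapStepA_eq (p s t : List Char) (c h : Char) :
    swapStepA (p.length : Int) ((p.length : Int) + 1 + s.length) (p ++ c :: (s ++ h :: t))
      = if c < h then p ++ h :: (s ++ c :: t) else p ++ c :: (s ++ h :: t) := by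
  have h1 : ((p.length : Int) + 1 + (s.length : Int)) = ((p.length + 1 + s.length : Nat) : Int) := by
    push_cast; ring
  have hget1 : PySem.List.pyGet? (p ++ c :: (s ++ h :: t)) (p.length : Int) = some c := by
    rw [PySem.List.pyGet?_natCast]
    exact getElem?_append_cons p _ c
  have hget2 : PySem.List.pyGet? (p ++ c :: (s ++ h :: t)) ((p.length : Int) + 1 + s.length) = some h := by
    rw [h1, PySem.List.pyGet?_natCast]
    have he : p ++ c :: (s ++ h :: t) = (p ++ c :: s) ++ h :: t := by simp
    have hlen : p.length + 1 + s.length = (p ++ c :: s).length := by simp; omega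
    rw [he, hlen]
    exact getElem?_append_cons _ _ h
  unfold swapStepA
  rw [hget1, hget2]
  dsimp only
  split_ifs with hch
  · rw [PySem.List.pySetD_natCast, set_append_cons, h1, PySem.List.pySetD_natCast]
    have he : p ++ h :: (s ++ h :: t) = (p ++ h :: s) ++ h :: t := by simp
    have hlen : p.length + 1 + s.length = (p ++ h :: s).length := by simp; omega
    rw [he, hlen, set_append_cons]
    simp
  · rfl

-- A's inner loop, after already having scanned the block s, performs selMax on the rest.
lemma inner_fold_eq (t : List Char) : ∀ (s p : List Char) (c : Char),
    (PySem.List.pyRange ((p.length : Int) + 1 + s.length) ((p.length : Int) + 1 + s.length + t.length) 1).foldl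
        (fun a y => swapStepA (p.length : Int) y a) (p ++ c :: (s ++ t))
      = p ++ (selMax c t).1 :: (s ++ (selMax c t).2) := by
  induction t with
  | nil =>
    intro s p c
    rw [PySem.List.pyRange_one_eq_nil (by simp)]
    simp [selMax]
  | cons h t ih =>
    intro s p c
    rw [PySem.List.pyRange_one_cons (by simp only [List.length_cons]; push_cast; omega)]
    simp only [List.foldl_cons]
    rw [swapStepA_eq p s t c h]
    by_cases hch : c < h
    · rw [if_pos hch]
      have harg : p ++ h :: (s ++ c :: t) = p ++ h :: ((s ++ [c]) ++ t) := by simp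
      rw [harg]
      have hrange : (PySem.List.pyRange ((p.length : Int) + 1 + s.length + 1)
            ((p.length : Int) + 1 + s.length + (h :: t).length) 1)
          = (PySem.List.pyRange ((p.length : Int) + 1 + (s ++ [c]).length)
            ((p.length : Int) + 1 + (s ++ [c]).length + t.length) 1) := by
        congr 1 <;> (simp only [List.length_append, List.length_cons, List.length_nil]; push_cast; ring)
      rw [hrange, ih (s ++ [c]) p h]
      simp [selMax, if_pos hch]
    · rw [if_neg hch]
      have harg : p ++ c :: (s ++ h :: t) = p ++ c :: ((s ++ [h]) ++ t) := by simp
      rw [harg]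
      have hrange : (PySem.List.pyRange ((p.length : Int) + 1 + s.length + 1)
            ((p.length : Int) + 1 + s.length + (h :: t).length) 1)
          = (PySem.List.pyRange ((p.length : Int) + 1 + (s ++ [h]).length)
            ((p.length : Int) + 1 + (s ++ [h]).length + t.length) 1) := by
        congr 1 <;> (simp only [List.length_append, List.length_cons, List.length_nil]; push_cast; ring)
      rw [hrange, ih (s ++ [h]) p c]
      simp [selMax, if_neg hch]

-- A's outer loop: state p ++ t with a sorted-descending prefix p dominating t; yields a descending permutation of t after p.
lemma outer_fold_eq : ∀ (ℓ : Nat) (t p : List Char), t.length = ℓ →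
    p.Pairwise (· ≥ ·) → (∀ u ∈ p, ∀ v ∈ t, v ≤ u) →
    ∃ r, (PySem.List.pyRange (p.length : Int) (((p.length : Int) + t.length) - 1) 1).foldl
        (fun a x => (PySem.List.pyRange (x + 1) (PySem.List.len a) 1).foldl
          (fun a y => swapStepA x y a) a) (p ++ t)
      = p ++ r ∧ r.Perm t ∧ (p ++ r).Pairwise (· ≥ ·) := by
  intro ℓ
  induction ℓ with
  | zero =>
    intro t p ht hp hcross
    have ht0 : t = [] := List.eq_nil_of_length_eq_zero ht
    subst ht0
    rw [PySem.List.pyRange_one_eq_nil (by simp)]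
    exact ⟨[], by simp, List.Perm.refl _, by simpa using hp⟩
  | succ ℓ ih =>
    intro t p ht hp hcross
    match t with
    | c :: t' =>
      have ht' : t'.length = ℓ := by simpa using ht
      by_cases hl : t'.length = 0
      · have ht'0 : t' = [] := List.eq_nil_of_length_eq_zero hl
        subst ht'0
        rw [PySem.List.pyRange_one_eq_nil (by simp)]
        refine ⟨[c], rfl, List.Perm.refl _, ?_⟩
        rw [List.pairwise_append]
        exact ⟨hp, by simp, by simpa using fun u hu => hcross u hu c (by simp)⟩
      · rw [PySem.List.pyRange_one_cons (by simp only [List.length_cons]; push_cast; omega)]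
        simp only [List.foldl_cons]
        have hlen : PySem.List.len (p ++ c :: t') = (p.length : Int) + 1 + t'.length := by
          simp [PySem.List.len_eq]; ring
        have hinner := inner_fold_eq t' [] p c
        simp only [List.nil_append, List.length_nil, Nat.cast_zero, add_zero] at hinner
        rw [hlen, hinner]
        set m := (selMax c t').1 with hm
        set t₂ := (selMax c t').2 with ht₂
        have hperm : (m :: t₂).Perm (c :: t') := selMax_perm c t'
        have hmax := selMax_le c t'
        have hlt₂ : t₂.length = ℓ := by
          have := hperm.length_eq
          simp at this; omega
        have hcross' : ∀ u ∈ p ++ [m], ∀ v ∈ t₂, v ≤ u := by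
          intro u hu v hv
          rcases List.mem_append.mp hu with hu | hu
          · exact hcross u hu v (hperm.mem_iff.mp (by simp [hv]))
          · simp at hu; subst hu; exact hmax.2 v hv
        have hp' : (p ++ [m]).Pairwise (· ≥ ·) := by
          rw [List.pairwise_append]
          refine ⟨hp, by simp, ?_⟩
          intro u hu v hv
          simp at hv; subst hv
          exact hcross u hu m (hperm.mem_iff.mp (by simp))
        have hrec := ih t₂ (p ++ [m]) hlt₂ hp' hcross'
        have hrange : (PySem.List.pyRange ((p.length : Int) + 1) (((p.length : Int) + (c :: t').length) - 1) 1)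
            = (PySem.List.pyRange (((p ++ [m]).length : Int)) ((((p ++ [m]).length : Int) + t₂.length) - 1) 1) := by
          congr 1 <;>
            (simp only [List.length_append, List.length_cons, List.length_nil]; push_cast; omega)
        have hstate : p ++ m :: t₂ = (p ++ [m]) ++ t₂ := by simp
        rw [hrange, hstate]
        obtain ⟨r, hfold, hrp, hpw⟩ := hrec
        refine ⟨m :: r, by rw [hfold]; simp, (hrp.cons m).trans hperm, by simpa using hpw⟩

-- Two descending (≥-pairwise) permutations of each other are equal.
lemma eq_of_perm_of_desc (l₁ l₂ : List Char) (hperm : l₁.Perm l₂)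
    (h₁ : l₁.Pairwise (· ≥ ·)) (h₂ : l₂.Pairwise (· ≥ ·)) : l₁ = l₂ :=
  List.Perm.eq_of_pairwise (fun _ _ _ _ hab hba => le_antisymm hba hab) h₁ h₂ hperm

-- count of c in the flatMap-of-replicates over nodup keys
lemma count_flatMap_replicate (ks xs : List Char) (hnd : ks.Nodup) (c : Char) :
    (ks.flatMap (fun ch => List.replicate (xs.count ch) ch)).count c
      = if c ∈ ks then xs.count c else 0 := by
  induction ks with
  | nil => simp
  | cons k ks ih =>
    have hnd' : ks.Nodup := (List.nodup_cons.mp hnd).2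
    have hk : k ∉ ks := (List.nodup_cons.mp hnd).1
    simp only [List.flatMap_cons, List.count_append, ih hnd', List.count_replicate]
    by_cases hck : c = k
    · subst hck
      simp [if_neg hk]
    · simp [hck, Ne.symm hck]

lemma flatMap_replicate_perm (ks xs : List Char) (hnd : ks.Nodup)
    (hmem : ∀ c, c ∈ ks ↔ c ∈ xs) :
    (ks.flatMap (fun ch => List.replicate (xs.count ch) ch)).Perm xs := by
  rw [List.perm_iff_count]
  intro c
  rw [count_flatMap_replicate ks xs hnd c]
  by_cases hc : c ∈ ks
  · simp [hc]
  · have hcx : c ∉ xs := fun h => hc ((hmem c).mpr h)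
    simp [hc, List.count_eq_zero_of_not_mem hcx]

lemma flatMap_replicate_desc (ks xs : List Char) (hks : ks.Pairwise (· ≥ ·)) :
    (ks.flatMap (fun ch => List.replicate (xs.count ch) ch)).Pairwise (· ≥ ·) := by
  induction ks with
  | nil => simp
  | cons k ks ih =>
    simp only [List.flatMap_cons]
    rw [List.pairwise_append]
    refine ⟨List.pairwise_replicate.mpr (by simp), ih hks.of_cons, ?_⟩
    intro u hu v hv
    have hu' : u = k := List.eq_of_mem_replicate hu
    obtain ⟨k', hk', hv'⟩ := List.mem_flatMap.mp hv
    have hv'' : v = k' := List.eq_of_mem_replicate hv'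
    subst hu'; subst hv''
    exact List.rel_of_pairwise_cons hks hk'

-- B's output, characterised: replicate-by-count over the distinct characters sorted descending.
lemma solution_alt_eq (s : String) :
    solution_alt s = String.ofList ((PySem.List.sorted (PySem.Set.ofList s.toList) (fun c => c) true).flatMap
      (fun ch => List.replicate (s.toList.count ch) ch)) := by
  unfold solution_alt
  dsimp only
  rw [PySem.Dict.foldl_insert_getD_add_one_eq_counter, PySem.Dict.keys_counter]
  congr 1
  have hf : (fun ch => PySem.List.pyRepeat [ch] ((PySem.Dict.counter s.toList).getD ch 0))
      = fun ch => List.replicate (s.toList.count ch) ch := by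
    funext ch
    rw [PySem.Dict.getD_counter, PySem.List.pyRepeat_singleton, Int.toNat_natCast]
  rw [hf]

-- A's output, characterised: some descending permutation of the characters.
lemma solution_eq (s : String) :
    ∃ r, solution s = String.ofList r ∧ r.Perm s.toList ∧ r.Pairwise (· ≥ ·) := by
  unfold solution
  dsimp only
  set a₀ := PySem.List.sorted s.toList (fun c => c) false with ha₀
  have hstart := outer_fold_eq a₀.length a₀ [] rfl (by simp) (by simp)
  simp only [List.nil_append, List.length_nil, Nat.cast_zero, zero_add] at hstart
  obtain ⟨r, hfold, hrp, hpw⟩ := hstart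
  have hlen0 : PySem.List.len a₀ - 1 = (a₀.length : Int) - 1 := by simp [PySem.List.len_eq]
  refine ⟨r, ?_, hrp.trans (PySem.List.sorted_perm _ _ _), by simpa using hpw⟩
  rw [hlen0, hfold]
  congr 1
  rw [PySem.List.foldl_pyRange_zero_pyGetD r ' ' (fun acc c => acc ++ [c]) []]
  exact PySem.List.foldl_append_singleton_eq_self r []

-- ===== VERDICT (by name: the statement is the Claim_ definition above) =====
theorem solution_spec : Claim_equal_solution := by
  intro s _
  unfold Spec_solution
  obtain ⟨r, hA, hperm, hdesc⟩ := solution_eq s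
  rw [hA, solution_alt_eq]
  set ks := PySem.List.sorted (PySem.Set.ofList s.toList) (fun c => c) true with hks
  have hnd : ks.Nodup := ((PySem.List.sorted_perm _ _ _).nodup_iff).mpr (PySem.Set.nodup_ofList _)
  have hmem : ∀ c, c ∈ ks ↔ c ∈ s.toList := by
    intro c
    rw [hks, PySem.List.mem_sorted, PySem.Set.mem_ofList]
  have hksd : ks.Pairwise (· ≥ ·) := by
    have := PySem.List.sorted_pairwise_rev (xs := PySem.Set.ofList s.toList) (key := fun c => c)
    exact this.imp (fun h => h)
  congr 1
  exact eq_of_perm_of_desc r _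
    (hperm.trans (flatMap_replicate_perm ks s.toList hnd hmem).symm)
    hdesc (flatMap_replicate_desc ks s.toList hksd)
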